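-- pv_equiv track=rewrite | github.com/ozfortress/voting-tools | 6s-nominations.py | sort_teams
-- ===== SOURCE A (Python) =====
-- def sort_teams(teams):
--     divisions = {}
--     for team_name, data in teams.items():
--         team_division = data['division']
--         if team_division not in divisions:
--             divisions[team_division] = {}
--         # del data['division']
--         divisions[team_division][team_name] = data
--
--     return divisions
-- ===== SOURCE B (Python) =====
-- def sort_teams(teams):
--     divisions = list(dict.fromkeys(data['division'] for data in teams.values()))
--     return {div: {name: data for name, data in teams.items() if data['division'] == div}
--             for div in divisions}
-- ===== Notes on version B (the rewrite author's own statement) =====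
-- stated objective: alternative
-- what changed: Replaces A's single pass that accumulates teams into a nested dict with a two-phase structure: first collect the distinct divisions in first-appearance order, then build each division's group by a separate filtering pass over the teams.
import Mathlib
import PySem

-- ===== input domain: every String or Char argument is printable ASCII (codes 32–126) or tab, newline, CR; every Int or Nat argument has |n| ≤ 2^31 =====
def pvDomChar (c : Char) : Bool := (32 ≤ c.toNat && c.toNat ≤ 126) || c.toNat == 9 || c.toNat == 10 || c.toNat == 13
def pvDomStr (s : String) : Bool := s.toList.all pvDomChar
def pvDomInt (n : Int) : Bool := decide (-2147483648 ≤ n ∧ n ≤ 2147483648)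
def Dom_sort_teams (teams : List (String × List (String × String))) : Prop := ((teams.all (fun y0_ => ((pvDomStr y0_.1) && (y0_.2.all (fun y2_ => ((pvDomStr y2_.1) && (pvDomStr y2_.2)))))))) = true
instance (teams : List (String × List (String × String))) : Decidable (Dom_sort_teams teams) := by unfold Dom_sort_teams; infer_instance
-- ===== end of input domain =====

-- B restructures A's single accumulate-into-nested-dict pass as: collect the distinct divisions
-- in first-appearance order, then one filtering pass per division (objective: alternative).

-- ===== PORT A =====
-- data['division'] of a team's data dict; ported as getD "division" "" — exact under Pre_,
-- which guarantees the key is present (Python raises KeyError otherwise)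
def pvKey (p : String × List (String × String)) : String :=
  PySem.Dict.getD (PySem.Dict.mk p.2) "division" ""

-- the body of A's 'for team_name, data in teams.items()' loop
def pvStepA (divisions : PySem.Dict String (PySem.Dict String (List (String × String))))
    (p : String × List (String × String)) :
    PySem.Dict String (PySem.Dict String (List (String × String))) :=
  let team_division := pvKey p
  let divisions := if divisions.contains team_division then divisions
                   else divisions.insert team_division PySem.Dict.empty
  -- divisions[team_division][team_name] = data
  divisions.modify team_division PySem.Dict.empty (fun inner => inner.insert p.1 p.2)

def sort_teams (teams : List (String × List (String × String))) : List (String × List (String × List (String × String))) :=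
  (teams.foldl pvStepA PySem.Dict.empty).items.map (fun q => (q.1, q.2.items))

-- ===== PORT B =====
def sort_teams_alt (teams : List (String × List (String × String))) : List (String × List (String × List (String × String))) :=
  let divisions := PySem.List.dedup (teams.map pvKey)   -- list(dict.fromkeys(data['division'] for data in teams.values()))
  divisions.map (fun dv =>
    (dv, (PySem.Dict.ofList (teams.filter (fun p => pvKey p == dv))).items))

-- ===== PRECONDITION & SPEC =====
-- Pre_ excludes exactly the inputs where some team's data dict lacks the key 'division':
-- there A raises KeyError.
def Pre_sort_teams (teams : List (String × List (String × String))) : Prop :=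
  ∀ p ∈ teams, (PySem.Dict.get? (PySem.Dict.mk p.2) "division").isSome = true
instance (teams : List (String × List (String × String))) : Decidable (Pre_sort_teams teams) := by unfold Pre_sort_teams; infer_instance
def pvWitness_sort_teams : (List (String × List (String × String))) :=
  [("alpha", [("division", "1"), ("seed", "3")]), ("beta", [("division", "2")]), ("gamma", [("division", "1")])]

def Spec_sort_teams (teams : List (String × List (String × String))) (out : List (String × List (String × List (String × String)))) : Prop := out = sort_teams_alt teams
instance (teams : List (String × List (String × String))) (out : List (String × List (String × List (String × String)))) : Decidable (Spec_sort_teams teams out) := by unfold Spec_sort_teams; infer_instance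

-- ===== CLAIM (what is proved, stated in full; the proofs are below) =====
def Claim_equal_sort_teams : Prop := ∀ (teams : List (String × List (String × String))), Dom_sort_teams teams → Pre_sort_teams teams → Spec_sort_teams teams (sort_teams teams)

-- ===== LEMMAS AND PROOFS =====

-- the nested dict A's loop has built after consuming the prefix xs, described in B's terms
def pvG (xs : List (String × List (String × String))) :
    PySem.Dict String (PySem.Dict String (List (String × String))) :=
  PySem.Dict.mk ((PySem.List.dedup (xs.map pvKey)).map
    (fun dv => (dv, PySem.Dict.ofList (xs.filter (fun p => pvKey p == dv)))))

theorem pvOfListAppendSingleton (l : List (String × List (String × String)))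
    (x : String × List (String × String)) :
    PySem.Dict.ofList (l ++ [x]) = (PySem.Dict.ofList l).insert x.1 x.2 := by
  simp [PySem.Dict.ofList, PySem.Dict.update, List.foldl_append]

theorem pvDedupAppendMem (l : List String) (a : String) (h : a ∈ l) :
    PySem.List.dedup (l ++ [a]) = PySem.List.dedup l := by
  simp [PySem.List.dedup, PySem.Set.ofList_append, PySem.Set.update_cons,
        PySem.Set.update_nil, PySem.Set.add, h]

theorem pvDedupAppendNotMem (l : List String) (a : String) (h : a ∉ l) :
    PySem.List.dedup (l ++ [a]) = PySem.List.dedup l ++ [a] := by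
  simp [PySem.List.dedup, PySem.Set.ofList_append, PySem.Set.update_cons,
        PySem.Set.update_nil, PySem.Set.add, h]

theorem pvGKeys (xs : List (String × List (String × String))) :
    (pvG xs).keys = PySem.List.dedup (xs.map pvKey) := by
  simp [pvG, PySem.Dict.keys_mk, List.map_map, Function.comp_def]

theorem pvStep (xs : List (String × List (String × String)))
    (x : String × List (String × String)) :
    pvStepA (pvG xs) x = pvG (xs ++ [x]) := by
  have hnodup : (pvG xs).keys.Nodup := (pvGKeys xs) ▸ PySem.List.nodup_dedup _
  by_cases hmem : pvKey x ∈ xs.map pvKey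
  · -- the division is already a key of the accumulator
    have hc : (pvG xs).contains (pvKey x) = true := by
      rw [PySem.Dict.contains_eq_decide_mem_keys, pvGKeys]
      simpa [PySem.List.mem_dedup] using hmem
    have hded := pvDedupAppendMem (xs.map pvKey) (pvKey x) hmem
    have hg : (pvG xs).getD (pvKey x) PySem.Dict.empty
        = PySem.Dict.ofList (xs.filter (fun p => pvKey p == pvKey x)) := by
      apply PySem.Dict.getD_of_mem_items _ _ hnodup
      exact List.mem_map_of_mem ((PySem.List.mem_dedup _ _).mpr hmem)
    show (if (pvG xs).contains (pvKey x) then pvG xs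
          else (pvG xs).insert (pvKey x) PySem.Dict.empty).modify (pvKey x) PySem.Dict.empty
            (fun inner => inner.insert x.1 x.2) = pvG (xs ++ [x])
    rw [hc, if_pos rfl]
    show (pvG xs).insert (pvKey x)
        (((pvG xs).getD (pvKey x) PySem.Dict.empty).insert x.1 x.2) = pvG (xs ++ [x])
    rw [hg]
    apply PySem.Dict.ext
    rw [PySem.Dict.items_insert_of_contains _ _ hc]
    show List.map _ ((PySem.List.dedup (xs.map pvKey)).map _) = _
    rw [List.map_map]
    simp only [pvG, List.map_append, List.map_cons, List.map_nil, hded]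
    apply List.map_congr_left
    intro dv hdv
    by_cases hdt : dv = pvKey x
    · subst hdt
      simp only [Function.comp, beq_self_eq_true, if_pos]
      rw [List.filter_append]
      simp [pvOfListAppendSingleton]
    · have h1 : (dv == pvKey x) = false := by simp [hdt]
      have h2 : (pvKey x == dv) = false := by
        simp only [beq_eq_false_iff_ne, ne_eq]
        exact fun h => hdt h.symm
      simp only [Function.comp, h1, Bool.false_eq_true, if_neg, not_false_iff]
      rw [List.filter_append]
      simp [h2]
  · -- a new division: A first inserts an empty inner dict
    have hc : (pvG xs).contains (pvKey x) = false := by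
      rw [PySem.Dict.contains_eq_decide_mem_keys, pvGKeys]
      simpa [PySem.List.mem_dedup] using hmem
    have hded := pvDedupAppendNotMem (xs.map pvKey) (pvKey x) hmem
    show (if (pvG xs).contains (pvKey x) then pvG xs
          else (pvG xs).insert (pvKey x) PySem.Dict.empty).modify (pvKey x) PySem.Dict.empty
            (fun inner => inner.insert x.1 x.2) = pvG (xs ++ [x])
    rw [hc, if_neg (by simp)]
    show ((pvG xs).insert (pvKey x) PySem.Dict.empty).insert (pvKey x)
        ((((pvG xs).insert (pvKey x) PySem.Dict.empty).getD (pvKey x) PySem.Dict.empty).insert x.1 x.2)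
        = pvG (xs ++ [x])
    rw [PySem.Dict.getD_insert_self, PySem.Dict.insert_insert_self]
    apply PySem.Dict.ext
    rw [PySem.Dict.items_insert_of_not_contains _ _ hc]
    simp only [pvG, List.map_append, List.map_cons, List.map_nil, hded]
    congr 1
    · apply List.map_congr_left
      intro dv hdv
      have hne : (pvKey x == dv) = false := by
        simp only [beq_eq_false_iff_ne, ne_eq]
        intro h
        exact hmem (h ▸ (PySem.List.mem_dedup _ _).mp hdv)
      rw [List.filter_append]
      simp [hne]
    · have hfil : xs.filter (fun p => pvKey p == pvKey x) = [] := by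
        apply List.filter_eq_nil_iff.mpr
        intro p hp hbeq
        exact hmem (by
          have : pvKey p = pvKey x := by simpa using hbeq
          exact this ▸ List.mem_map_of_mem hp)
      rw [List.filter_append, hfil]
      simp [PySem.Dict.ofList, PySem.Dict.update, PySem.Dict.empty, PySem.Dict.insert,
            PySem.Dict.contains]

theorem pvFold (xs : List (String × List (String × String))) :
    xs.foldl pvStepA PySem.Dict.empty = pvG xs := by
  induction xs using List.reverseRecOn with
  | nil => rfl
  | append_singleton ys y ih => rw [List.foldl_append, List.foldl_cons, List.foldl_nil, ih, pvStep]

-- ===== VERDICT (by name: the statement is the Claim_ definition above) =====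
theorem sort_teams_spec : Claim_equal_sort_teams := by
  intro teams _ _
  show sort_teams teams = sort_teams_alt teams
  rw [sort_teams, pvFold]
  simp [pvG, sort_teams_alt, List.map_map, Function.comp_def]
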